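-- pv_equiv track=rewrite | github.com/calderast/Hex-maze | src/hexmaze/utils.py | rotate_hex
-- ===== SOURCE A (Python) =====
-- def rotate_hex(original_hex: int, direction="counterclockwise") -> int:
--     """
--     Given a hex in the hex maze, returns the corresponding hex if the maze is rotated once
--     counterclockwise (e.g. hex 1 becomes hex 2, 4 becomes 49, etc.). Option to specify
--     direction='clockwise' to rotate clockwise instead (e.g 1 becomes 3, 4 becomes 48, etc.)
--
--     Parameters:
--         original_hex (int): The hex in the hex maze to rotate (1-49)
--         direction (str): Which direction to rotate the hex ('clockwise' or 'counterclockwise')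
--             Defaults to 'counterclockwise'
--
--     Returns:
--         int: The corresponding hex if the maze was rotated once in the specified direction
--     """
--     # Lists of corresponding hexes when the maze is rotated 120 degrees
--     hex_rotation_lists = [[1,2,3], [4,49,48], [6,47,33], [5,38,43], [8,42,28],
--                          [7,32,39], [11,46,23], [10,37,34], [9,27,44], [14,41,19],
--                          [13,31,29], [12,22,40], [18,45,15], [17,36,24], [16,26,35],
--                          [21,30,20], [25]]
--
--     for lst in hex_rotation_lists:
--         if original_hex in lst:
--             index = lst.index(original_hex)
--             if direction == "clockwise":
--                 return lst[(index - 1) % len(lst)]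
--             else:  # I choose to assume any direction not specified 'clockwise' is 'counterclockwise'
--                 return lst[(index + 1) % len(lst)]
--     # Return None if the hex to rotate doesn't exist in our rotation lists (all hexes should exist)
--     return None
-- ===== SOURCE B (Python) =====
-- # Precomputed rotation table: hex -> (clockwise neighbour, counterclockwise neighbour).
-- _ROTATION = {
--     1: (3, 2), 2: (1, 3), 3: (2, 1), 4: (48, 49), 49: (4, 48), 48: (49, 4),
--     6: (33, 47), 47: (6, 33), 33: (47, 6), 5: (43, 38), 38: (5, 43), 43: (38, 5),
--     8: (28, 42), 42: (8, 28), 28: (42, 8), 7: (39, 32), 32: (7, 39), 39: (32, 7),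
--     11: (23, 46), 46: (11, 23), 23: (46, 11), 10: (34, 37), 37: (10, 34), 34: (37, 10),
--     9: (44, 27), 27: (9, 44), 44: (27, 9), 14: (19, 41), 41: (14, 19), 19: (41, 14),
--     13: (29, 31), 31: (13, 29), 29: (31, 13), 12: (40, 22), 22: (12, 40), 40: (22, 12),
--     18: (15, 45), 45: (18, 15), 15: (45, 18), 17: (24, 36), 36: (17, 24), 24: (36, 17),
--     16: (35, 26), 26: (16, 35), 35: (26, 16), 21: (20, 30), 30: (21, 20), 20: (30, 21),
--     25: (25, 25),
-- }
--
-- def rotate_hex(original_hex: int, direction="counterclockwise") -> int: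
--     pair = _ROTATION.get(original_hex)
--     if pair is None:
--         return None
--     return pair[0] if direction == "clockwise" else pair[1]
-- ===== Notes on version B (the rewrite author's own statement) =====
-- stated objective: simpler
-- what changed: Replaces A's per-call scan over the 17 rotation lists (membership test, .index, and modular index arithmetic) with a precomputed module-level dict mapping each hex to its (clockwise, counterclockwise) image, so the function body is a single .get lookup.
import Mathlib
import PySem

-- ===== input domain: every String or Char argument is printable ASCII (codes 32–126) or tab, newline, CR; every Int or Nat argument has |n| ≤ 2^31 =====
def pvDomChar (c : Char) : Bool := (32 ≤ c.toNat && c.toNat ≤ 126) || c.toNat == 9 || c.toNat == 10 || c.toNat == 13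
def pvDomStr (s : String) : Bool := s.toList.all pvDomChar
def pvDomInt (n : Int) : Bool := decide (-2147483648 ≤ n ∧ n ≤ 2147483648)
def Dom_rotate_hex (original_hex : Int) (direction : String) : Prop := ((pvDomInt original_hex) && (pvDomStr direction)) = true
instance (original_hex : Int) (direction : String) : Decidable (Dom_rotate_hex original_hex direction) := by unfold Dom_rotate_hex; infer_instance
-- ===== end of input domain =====

-- B replaces A's scan of the rotation lists (with .index and modular arithmetic per call) by a
-- single lookup in a precomputed hex -> (clockwise, counterclockwise) table; same return values.

-- ===== PORT A =====
def hexRotationLists : List (List Int) :=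
  [[1,2,3], [4,49,48], [6,47,33], [5,38,43], [8,42,28],
   [7,32,39], [11,46,23], [10,37,34], [9,27,44], [14,41,19],
   [13,31,29], [12,22,40], [18,45,15], [17,36,24], [16,26,35],
   [21,30,20], [25]]

-- the `for lst in hex_rotation_lists` loop with its early returns
def rotateLoop (original_hex : Int) (direction : String) : List (List Int) → Option Int
  | [] => none
  | lst :: rest =>
    if original_hex ∈ lst then
      match PySem.List.index? lst original_hex with
      | some index =>
        if direction == "clockwise" then
          PySem.List.pyGet? lst (PySem.Int.mod ((index : Int) - 1) lst.length)
        else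
          PySem.List.pyGet? lst (PySem.Int.mod ((index : Int) + 1) lst.length)
      | none => none  -- unreachable: index? succeeds after the membership test
    else rotateLoop original_hex direction rest

def rotate_hex (original_hex : Int) (direction : String) : Option Int :=
  rotateLoop original_hex direction hexRotationLists

-- ===== PORT B =====
-- Source B's module-level literal dict _ROTATION: hex -> (clockwise, counterclockwise)
def rotationTable : PySem.Dict Int (Int × Int) :=
  PySem.Dict.mk [(1, (3, 2)), (2, (1, 3)), (3, (2, 1)), (4, (48, 49)), (49, (4, 48)), (48, (49, 4)),
    (6, (33, 47)), (47, (6, 33)), (33, (47, 6)), (5, (43, 38)), (38, (5, 43)), (43, (38, 5)),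
    (8, (28, 42)), (42, (8, 28)), (28, (42, 8)), (7, (39, 32)), (32, (7, 39)), (39, (32, 7)),
    (11, (23, 46)), (46, (11, 23)), (23, (46, 11)), (10, (34, 37)), (37, (10, 34)), (34, (37, 10)),
    (9, (44, 27)), (27, (9, 44)), (44, (27, 9)), (14, (19, 41)), (41, (14, 19)), (19, (41, 14)),
    (13, (29, 31)), (31, (13, 29)), (29, (31, 13)), (12, (40, 22)), (22, (12, 40)), (40, (22, 12)),
    (18, (15, 45)), (45, (18, 15)), (15, (45, 18)), (17, (24, 36)), (36, (17, 24)), (24, (36, 17)),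
    (16, (35, 26)), (26, (16, 35)), (35, (26, 16)), (21, (20, 30)), (30, (21, 20)), (20, (30, 21)),
    (25, (25, 25))]

def rotate_hex_alt (original_hex : Int) (direction : String) : Option Int :=
  match rotationTable.get? original_hex with
  | none => none
  | some pair => some (if direction == "clockwise" then pair.1 else pair.2)

-- ===== PRECONDITION & SPEC =====
def Spec_rotate_hex (original_hex : Int) (direction : String) (out : Option Int) : Prop := out = rotate_hex_alt original_hex direction
instance (original_hex : Int) (direction : String) (out : Option Int) : Decidable (Spec_rotate_hex original_hex direction out) := by unfold Spec_rotate_hex; infer_instance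

-- ===== CLAIM (what is proved, stated in full; the proofs are below) =====
def Claim_equal_rotate_hex : Prop := ∀ (original_hex : Int) (direction : String), Dom_rotate_hex original_hex direction → Spec_rotate_hex original_hex direction (rotate_hex original_hex direction)

-- ===== LEMMAS AND PROOFS =====

-- A's loop with the direction string abstracted to the one Bool it is compared against
def rotALoopB (x : Int) (cw : Bool) : List (List Int) → Option Int
  | [] => none
  | lst :: rest =>
    if x ∈ lst then
      match PySem.List.index? lst x with
      | some index =>
        if cw then
          PySem.List.pyGet? lst (PySem.Int.mod ((index : Int) - 1) lst.length)
        else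
          PySem.List.pyGet? lst (PySem.Int.mod ((index : Int) + 1) lst.length)
      | none => none
    else rotALoopB x cw rest

lemma rotateLoop_eq (x : Int) (d : String) (L : List (List Int)) :
    rotateLoop x d L = rotALoopB x (d == "clockwise") L := by
  induction L with
  | nil => rfl
  | cons lst rest ih => simp [rotateLoop, rotALoopB, ih]

-- B with the direction string abstracted the same way
def rotBB (x : Int) (cw : Bool) : Option Int :=
  match rotationTable.get? x with
  | none => none
  | some pair => some (if cw then pair.1 else pair.2)

lemma alt_eq (x : Int) (d : String) :
    rotate_hex_alt x d = rotBB x (d == "clockwise") := by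
  simp only [rotate_hex_alt, rotBB]

lemma loop_none (x : Int) (cw : Bool) (L : List (List Int)) (h : ∀ lst ∈ L, x ∉ lst) :
    rotALoopB x cw L = none := by
  induction L with
  | nil => rfl
  | cons lst rest ih =>
    simp only [rotALoopB, if_neg (h lst (List.mem_cons_self))]
    exact ih fun l hl => h l (List.mem_cons_of_mem _ hl)

lemma get?_none_of_keys_bounded (x : Int) (h : x < 1 ∨ 49 < x) :
    ∀ (l : List (Int × (Int × Int))), (l.all fun p => 1 ≤ p.1 && p.1 ≤ 49) = true →
      (PySem.Dict.mk l).get? x = none := by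
  intro l
  induction l with
  | nil => intro _; rfl
  | cons p rest ih =>
    intro hall
    simp only [List.all_cons, Bool.and_eq_true, decide_eq_true_eq] at hall
    rw [PySem.Dict.get?_mk_cons, if_neg]
    · exact ih (by simpa using hall.2)
    · have := hall.1
      simp only [beq_iff_eq]
      omega

lemma table_none (x : Int) (h : x < 1 ∨ 49 < x) : rotationTable.get? x = none :=
  get?_none_of_keys_bounded x h _ (by decide)

-- ===== VERDICT (by name: the statement is the Claim_ definition above) =====
set_option maxRecDepth 4000 in
theorem rotate_hex_spec : Claim_equal_rotate_hex := by
  intro x d _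
  unfold Spec_rotate_hex
  rw [rotate_hex, rotateLoop_eq, alt_eq]
  generalize (d == "clockwise") = cw
  by_cases h : 1 ≤ x ∧ x ≤ 49
  · obtain ⟨h1, h2⟩ := h
    interval_cases x <;> cases cw <;> decide
  · rw [Decidable.not_and_iff_or_not] at h
    have h' : x < 1 ∨ 49 < x := by omega
    rw [loop_none x cw _ (by
      intro lst hl hm
      fin_cases hl <;>
        (simp only [List.mem_cons, List.not_mem_nil, or_false] at hm; omega))]
    simp only [rotBB, table_none x h']
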